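-- pv_equiv track=rewrite | github.com/ChenQX1/object-detection-exp-framework | pth2caffe/graph2.py | replaceSubGraph
-- ===== SOURCE A (Python) =====
-- def replaceSubGraph(nodes,sub_graphs,new_nodes):
--     result = []
--     for item in nodes:
--         replace = False
--         for drop,new_node in zip(sub_graphs,new_nodes):
--             if item in drop:
--                 replace = True
--             if (item in drop) and (new_node not in result):
--                 result.append(new_node)
--         if replace is False:
--             result.append(item)
--     return result
-- ===== SOURCE B (Python) =====
-- def replaceSubGraph(nodes, sub_graphs, new_nodes):
--     # Precompute node -> list of replacement nodes (one per subgraph containing it,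
--     # in subgraph order), then a single pass over nodes with a membership set.
--     mapping = {}
--     for drop, new_node in zip(sub_graphs, new_nodes):
--         for n in dict.fromkeys(drop):
--             mapping.setdefault(n, []).append(new_node)
--     result = []
--     seen = set()
--     for item in nodes:
--         reps = mapping.get(item, [])
--         if not reps:
--             result.append(item)
--             seen.add(item)
--         else:
--             for nn in reps:
--                 if nn not in seen:
--                     result.append(nn)
--                     seen.add(nn)
--     return result
-- ===== Notes on version B (the rewrite author's own statement) =====
-- stated objective: faster
-- what changed: Precomputes a node-to-replacements dict from the subgraphs once and keeps a membership set for the result, so each node is handled in one pass without rescanning every subgraph and the whole result list.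
import Mathlib
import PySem

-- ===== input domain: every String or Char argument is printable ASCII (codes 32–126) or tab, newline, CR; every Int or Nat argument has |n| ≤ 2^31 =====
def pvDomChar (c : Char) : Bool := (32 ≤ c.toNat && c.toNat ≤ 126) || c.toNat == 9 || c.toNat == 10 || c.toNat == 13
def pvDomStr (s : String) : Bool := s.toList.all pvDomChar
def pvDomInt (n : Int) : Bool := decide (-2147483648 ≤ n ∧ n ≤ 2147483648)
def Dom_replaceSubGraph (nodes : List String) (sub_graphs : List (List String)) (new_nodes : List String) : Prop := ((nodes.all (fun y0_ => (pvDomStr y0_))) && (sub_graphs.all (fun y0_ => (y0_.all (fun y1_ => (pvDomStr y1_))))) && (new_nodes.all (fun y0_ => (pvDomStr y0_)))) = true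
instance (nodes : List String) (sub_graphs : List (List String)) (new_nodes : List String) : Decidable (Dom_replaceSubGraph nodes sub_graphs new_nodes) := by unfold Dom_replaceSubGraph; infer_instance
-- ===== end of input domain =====

-- B replaces A's per-node rescans of all subgraphs and of the result list by a precomputed
-- node→replacements dict plus a membership set: a different single-pass algorithm, measured faster.


-- ===== PORT A =====
def replaceSubGraph (nodes : List String) (sub_graphs : List (List String)) (new_nodes : List String) : List String :=
  nodes.foldl (fun result item =>
    let st := (sub_graphs.zip new_nodes).foldl
      (fun (st : Bool × List String) p =>
        let st := if p.1.contains item then (true, st.2) else st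
        if p.1.contains item && !(st.2.contains p.2) then (st.1, st.2 ++ [p.2]) else st)
      (false, result)
    if st.1 then st.2 else st.2 ++ [item]) []

-- ===== PORT B =====
-- mapping = {}; for drop, new_node in zip(...): for n in dict.fromkeys(drop): mapping.setdefault(n, []).append(new_node)
def pvBuildMap (pairs : List (List String × String)) : PySem.Dict String (List String) :=
  pairs.foldl (fun m p =>
    (PySem.List.dedup p.1).foldl (fun m n => m.modify n [] (· ++ [p.2])) m) PySem.Dict.empty

def replaceSubGraph_alt (nodes : List String) (sub_graphs : List (List String)) (new_nodes : List String) : List String :=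
  let mapping := pvBuildMap (sub_graphs.zip new_nodes)
  (nodes.foldl (fun (st : List String × PySem.Set String) item =>
      let reps := mapping.getD item []
      if reps.isEmpty then (st.1 ++ [item], PySem.Set.add st.2 item)
      else reps.foldl (fun st nn =>
        if PySem.Set.contains st.2 nn then st else (st.1 ++ [nn], PySem.Set.add st.2 nn)) st)
    ([], PySem.Set.empty)).1

-- ===== PRECONDITION & SPEC =====
def Spec_replaceSubGraph (nodes : List String) (sub_graphs : List (List String)) (new_nodes : List String) (out : List String) : Prop := out = replaceSubGraph_alt nodes sub_graphs new_nodes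
instance (nodes : List String) (sub_graphs : List (List String)) (new_nodes : List String) (out : List String) : Decidable (Spec_replaceSubGraph nodes sub_graphs new_nodes out) := by unfold Spec_replaceSubGraph; infer_instance

-- ===== CLAIM (what is proved, stated in full; the proofs are below) =====
def Claim_equal_replaceSubGraph : Prop := ∀ (nodes : List String) (sub_graphs : List (List String)) (new_nodes : List String), Dom_replaceSubGraph nodes sub_graphs new_nodes → Spec_replaceSubGraph nodes sub_graphs new_nodes (replaceSubGraph nodes sub_graphs new_nodes)

-- ===== LEMMAS AND PROOFS =====

-- the replacements a given node receives: one new_node per subgraph pair containing it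
def pvReps (item : String) (pairs : List (List String × String)) : List String :=
  (pairs.filter (fun p => p.1.contains item)).map (·.2)

-- named copies of the ports' loop bodies (definitionally equal to the inline lambdas)
def pvStepA (r : List String) (nn : String) : List String :=
  if r.contains nn then r else r ++ [nn]

def pvFA (item : String) : (Bool × List String) → (List String × String) → Bool × List String :=
  fun st p =>
    let st := if p.1.contains item then (true, st.2) else st
    if p.1.contains item && !(st.2.contains p.2) then (st.1, st.2 ++ [p.2]) else st

def pvOuterA (pairs : List (List String × String)) (result : List String) (item : String) : List String :=
  if (pairs.foldl (pvFA item) (false, result)).1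
  then (pairs.foldl (pvFA item) (false, result)).2
  else (pairs.foldl (pvFA item) (false, result)).2 ++ [item]

def pvGB (st : List String × PySem.Set String) (nn : String) : List String × PySem.Set String :=
  if PySem.Set.contains st.2 nn then st else (st.1 ++ [nn], PySem.Set.add st.2 nn)

def pvFB (m : PySem.Dict String (List String)) (st : List String × PySem.Set String)
    (item : String) : List String × PySem.Set String :=
  if (m.getD item []).isEmpty then (st.1 ++ [item], PySem.Set.add st.2 item)
  else (m.getD item []).foldl pvGB st

lemma pvBuildMap_eq_flat (pairs : List (List String × String)) (d : PySem.Dict String (List String)) :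
    pairs.foldl (fun m p =>
      (PySem.List.dedup p.1).foldl (fun m n => m.modify n [] (· ++ [p.2])) m) d
    = (pairs.flatMap (fun p => (PySem.List.dedup p.1).map (fun n => (n, p.2)))).foldl
        (fun m q => m.modify q.1 [] (· ++ [q.2])) d := by
  induction pairs generalizing d with
  | nil => rfl
  | cons p rest ih =>
      simp only [List.foldl_cons, List.flatMap_cons, List.foldl_append, List.foldl_map]
      exact ih _

lemma pvFilter_nodup_beq (l : List String) (hl : l.Nodup) (item : String) :
    l.filter (fun n => n == item) = if l.contains item then [item] else [] := by
  have : l.filter (fun n => n == item) = l.filter (· == item) := by simp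
  rw [this, List.filter_beq]
  by_cases h : item ∈ l
  · rw [List.count_eq_one_of_mem hl h]; simp [h]
  · rw [List.count_eq_zero_of_not_mem h]; simp [h]

lemma pvBuildMap_getD (pairs : List (List String × String)) (item : String) :
    (pvBuildMap pairs).getD item [] = pvReps item pairs := by
  unfold pvBuildMap
  rw [pvBuildMap_eq_flat, PySem.Dict.getD_foldl_modify_append]
  simp only [PySem.Dict.getD_empty, List.nil_append]
  induction pairs with
  | nil => rfl
  | cons p rest ih =>
      simp only [List.flatMap_cons, List.filter_append, List.map_append, ih]
      have h1 : ((PySem.List.dedup p.1).map (fun n => (n, p.2))).filter (fun q => q.1 == item)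
          = ((PySem.List.dedup p.1).filter (fun n => n == item)).map (fun n => (n, p.2)) := by
        rw [List.filter_map]; rfl
      rw [h1, pvFilter_nodup_beq _ (PySem.List.nodup_dedup p.1) item]
      have hmem : (PySem.List.dedup p.1).contains item = p.1.contains item := by
        simp
      rw [hmem]
      unfold pvReps
      by_cases h : item ∈ p.1 <;> simp [h, List.contains_eq_mem]

lemma pvInnerA (item : String) (pairs : List (List String × String)) (b : Bool) (r : List String) :
    pairs.foldl (pvFA item) (b, r)
    = (b || pairs.any (fun p => p.1.contains item), (pvReps item pairs).foldl pvStepA r) := by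
  induction pairs generalizing b r with
  | nil => simp [pvReps]
  | cons p rest ih =>
      rw [List.foldl_cons]
      by_cases h : item ∈ p.1
      · by_cases hc : p.2 ∈ r
        · rw [show pvFA item (b, r) p = (true, r) from by
            simp [pvFA, h, hc, List.contains_eq_mem], ih]
          simp [pvReps, h, pvStepA, hc, List.any_cons, List.contains_eq_mem]
        · rw [show pvFA item (b, r) p = (true, r ++ [p.2]) from by
            simp [pvFA, h, hc, List.contains_eq_mem], ih]
          simp [pvReps, h, pvStepA, hc, List.any_cons, List.contains_eq_mem]
      · rw [show pvFA item (b, r) p = (b, r) from by simp [pvFA, h, List.contains_eq_mem], ih]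
        simp [pvReps, h, List.any_cons, List.contains_eq_mem]

lemma pvReps_nil_of_any_false (item : String) (pairs : List (List String × String))
    (hany : pairs.any (fun p => p.1.contains item) = false) :
    pvReps item pairs = [] := by
  unfold pvReps
  rw [List.map_eq_nil_iff, List.filter_eq_nil_iff]
  intro p hp
  have := List.any_eq_false.mp hany p hp
  simp_all

lemma pvReps_ne_nil_of_any_true (item : String) (pairs : List (List String × String))
    (hany : pairs.any (fun p => p.1.contains item) = true) :
    pvReps item pairs ≠ [] := by
  obtain ⟨p, hp, hpred⟩ := List.any_eq_true.mp hany
  unfold pvReps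
  simp only [ne_eq, List.map_eq_nil_iff, List.filter_eq_nil_iff]
  intro h
  exact absurd hpred (by simpa using h p hp)

lemma pvInvAdd (s : PySem.Set String) (r : List String)
    (hinv : ∀ x, PySem.Set.contains s x = r.contains x) (item : String) :
    ∀ x, PySem.Set.contains (PySem.Set.add s item) x = (r ++ [item]).contains x := by
  intro x
  have key : (x ∈ s) ↔ (x ∈ r) := by
    have h := hinv x
    simp only [PySem.Set.contains_eq_listContains, List.contains_eq_mem] at h
    exact decide_eq_decide.mp h
  by_cases hm : item ∈ s
  · rw [PySem.Set.add_of_mem hm]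
    simp only [PySem.Set.contains_eq_listContains, List.contains_eq_mem, List.mem_append,
      List.mem_singleton]
    refine decide_eq_decide.mpr ?_
    constructor
    · intro h; exact Or.inl (key.mp h)
    · rintro (h | rfl)
      · exact key.mpr h
      · exact hm
  · rw [PySem.Set.add_of_not_mem hm]
    simp only [PySem.Set.contains_eq_listContains, List.contains_eq_mem, List.mem_append,
      List.mem_singleton]
    exact decide_eq_decide.mpr (or_congr key Iff.rfl)

lemma pvInnerB (reps : List String) (r : List String) (s : PySem.Set String)
    (hinv : ∀ x, PySem.Set.contains s x = r.contains x) :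
    (reps.foldl pvGB (r, s)).1 = reps.foldl pvStepA r
    ∧ ∀ x, PySem.Set.contains ((reps.foldl pvGB (r, s)).2) x = (reps.foldl pvStepA r).contains x := by
  induction reps generalizing r s with
  | nil => exact ⟨rfl, hinv⟩
  | cons nn rest ih =>
      rw [List.foldl_cons, List.foldl_cons]
      by_cases h : nn ∈ s
      · have hc : PySem.Set.contains s nn = true := by
          simp [PySem.Set.contains_eq_listContains, List.contains_eq_mem, h]
        have hr : r.contains nn = true := by rw [← hinv nn]; exact hc
        have hrm : nn ∈ r := by simpa [List.contains_eq_mem] using hr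
        have hg : pvGB (r, s) nn = (r, s) := by simp [pvGB, h]
        have hA : pvStepA r nn = r := by simp [pvStepA, hrm]
        rw [hg, hA]; exact ih r s hinv
      · have hc : PySem.Set.contains s nn = false := by
          simp [PySem.Set.contains_eq_listContains, List.contains_eq_mem, h]
        have hr : r.contains nn = false := by rw [← hinv nn]; exact hc
        have hrm : nn ∉ r := by simpa [List.contains_eq_mem] using hr
        have hg : pvGB (r, s) nn = (r ++ [nn], PySem.Set.add s nn) := by simp [pvGB, h]
        have hA : pvStepA r nn = r ++ [nn] := by simp [pvStepA, hrm]
        rw [hg, hA]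
        exact ih _ _ (pvInvAdd s r hinv nn)

lemma pvMain (nodes : List String) (pairs : List (List String × String))
    (r : List String) (s : PySem.Set String)
    (hinv : ∀ x, PySem.Set.contains s x = r.contains x) :
    (nodes.foldl (pvFB (pvBuildMap pairs)) (r, s)).1 = nodes.foldl (pvOuterA pairs) r
    ∧ ∀ x, PySem.Set.contains ((nodes.foldl (pvFB (pvBuildMap pairs)) (r, s)).2) x
        = (nodes.foldl (pvOuterA pairs) r).contains x := by
  induction nodes generalizing r s with
  | nil => exact ⟨rfl, hinv⟩
  | cons item rest ih =>
      rw [List.foldl_cons, List.foldl_cons]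
      have hA : pvOuterA pairs r item
          = if pairs.any (fun p => p.1.contains item) = true
            then (pvReps item pairs).foldl pvStepA r else r ++ [item] := by
        unfold pvOuterA
        rw [pvInnerA item pairs false r]
        by_cases hany : pairs.any (fun p => p.1.contains item) = true
        · rw [if_pos (by simpa using hany), if_pos hany]
        · rw [if_neg (by simpa using hany), if_neg hany,
              pvReps_nil_of_any_false item pairs (Bool.eq_false_iff.mpr hany), List.foldl_nil]
      by_cases hany : pairs.any (fun p => p.1.contains item) = true
      · have hne : (pvReps item pairs).isEmpty = false := by
          have hnn := pvReps_ne_nil_of_any_true item pairs hany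
          cases hh : (pvReps item pairs).isEmpty
          · rfl
          · exact absurd (List.isEmpty_iff.mp hh) hnn
        have hB : pvFB (pvBuildMap pairs) (r, s) item = (pvReps item pairs).foldl pvGB (r, s) := by
          unfold pvFB
          rw [pvBuildMap_getD, hne]
          simp
        obtain ⟨h1, h2⟩ := pvInnerB (pvReps item pairs) r s hinv
        rw [hA, if_pos hany, hB, show (pvReps item pairs).foldl pvGB (r, s)
            = ((pvReps item pairs).foldl pvStepA r, ((pvReps item pairs).foldl pvGB (r, s)).2) from by
              rw [← h1]]
        exact ih _ _ h2
      · have hnil : pvReps item pairs = [] :=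
          pvReps_nil_of_any_false item pairs (Bool.eq_false_iff.mpr hany)
        have he : (pvReps item pairs).isEmpty = true := by rw [hnil]; rfl
        have hB : pvFB (pvBuildMap pairs) (r, s) item = (r ++ [item], PySem.Set.add s item) := by
          unfold pvFB
          rw [pvBuildMap_getD, he]
          simp
        rw [hA, if_neg hany, hB]
        exact ih _ _ (pvInvAdd s r hinv item)

-- ===== VERDICT (by name: the statement is the Claim_ definition above) =====
theorem replaceSubGraph_spec : Claim_equal_replaceSubGraph := by
  intro nodes sub_graphs new_nodes _
  show replaceSubGraph nodes sub_graphs new_nodes = replaceSubGraph_alt nodes sub_graphs new_nodes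
  have h := (pvMain nodes (sub_graphs.zip new_nodes) [] PySem.Set.empty (fun _ => rfl)).1
  exact h.symm
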